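-- pv_equiv track=rewrite | github.com/CarrotWiz/DiscordWithBraille | toBraille.py | brailleToBinary
-- ===== SOURCE A (Python) =====
-- def brailleToBinary(braille):
--     binaryList = [0] * 256
--     topLeft = 0
--     for b42 in braille:
--         binaryList[topLeft] = b42[0][0]
--         binaryList[topLeft+1] = b42[0][1]
--         binaryList[topLeft+32] = b42[1][0]
--         binaryList[topLeft+33] = b42[1][1]
--         binaryList[topLeft+64] = b42[2][0]
--         binaryList[topLeft+65] = b42[2][1]
--         binaryList[topLeft+96] = b42[3][0]
--         binaryList[topLeft+97] = b42[3][1]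
--         topLeft += 2
--         if topLeft%32 == 0:
--             topLeft += 96
--     return binaryList
-- ===== SOURCE B (Python) =====
-- def brailleToBinary(braille):
--     n = len(braille)
--     def cell(k):
--         i = (k // 128) * 16 + (k % 32) // 2
--         if i < n:
--             return braille[i][(k % 128) // 32][k % 2]
--         return 0
--     return [cell(k) for k in range(256)]
-- ===== Notes on version B (the rewrite author's own statement) =====
-- stated objective: alternative
-- what changed: Inverts the traversal: instead of A's scatter (iterate over blocks, maintain a mutable topLeft accumulator and write eight cells each), B is a gather — one comprehension over the 256 output positions, each computing its source block, row and column from its own index and reading the input.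
import Mathlib
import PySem

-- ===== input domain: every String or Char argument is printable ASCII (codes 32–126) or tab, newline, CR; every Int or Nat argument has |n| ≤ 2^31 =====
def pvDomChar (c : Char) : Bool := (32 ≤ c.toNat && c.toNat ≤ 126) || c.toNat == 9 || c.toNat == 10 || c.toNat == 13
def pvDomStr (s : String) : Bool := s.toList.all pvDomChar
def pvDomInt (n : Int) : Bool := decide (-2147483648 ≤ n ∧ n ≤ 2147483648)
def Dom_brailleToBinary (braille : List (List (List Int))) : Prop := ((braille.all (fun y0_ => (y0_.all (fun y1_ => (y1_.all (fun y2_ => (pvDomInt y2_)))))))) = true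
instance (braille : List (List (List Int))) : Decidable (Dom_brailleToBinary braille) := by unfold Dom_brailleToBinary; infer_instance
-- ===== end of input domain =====

-- B rebuilds the grid as a gather: one comprehension over the 256 output cells, each computing
-- its source block/row/col from its own index — instead of A's stateful scatter over the blocks
-- (objective: alternative; same O(1)-size output, different traversal direction).
set_option maxHeartbeats 1000000
set_option maxRecDepth 8000


-- ===== PORT A =====
-- literal transliteration of A's loop body: (binaryList, topLeft) state, eight unrolled writes,
-- then topLeft += 2 and the %32 / +=96 adjustment; pySetD/pyGetD are exact on Pre_ (all indices in range there)
def pvStepA (st : List Int × Int) (b42 : List (List Int)) : List Int × Int :=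
  let bl := st.1
  let tl := st.2
  let bl := PySem.List.pySetD bl tl (PySem.List.pyGetD (PySem.List.pyGetD b42 0 []) 0 0)
  let bl := PySem.List.pySetD bl (tl+1) (PySem.List.pyGetD (PySem.List.pyGetD b42 0 []) 1 0)
  let bl := PySem.List.pySetD bl (tl+32) (PySem.List.pyGetD (PySem.List.pyGetD b42 1 []) 0 0)
  let bl := PySem.List.pySetD bl (tl+33) (PySem.List.pyGetD (PySem.List.pyGetD b42 1 []) 1 0)
  let bl := PySem.List.pySetD bl (tl+64) (PySem.List.pyGetD (PySem.List.pyGetD b42 2 []) 0 0)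
  let bl := PySem.List.pySetD bl (tl+65) (PySem.List.pyGetD (PySem.List.pyGetD b42 2 []) 1 0)
  let bl := PySem.List.pySetD bl (tl+96) (PySem.List.pyGetD (PySem.List.pyGetD b42 3 []) 0 0)
  let bl := PySem.List.pySetD bl (tl+97) (PySem.List.pyGetD (PySem.List.pyGetD b42 3 []) 1 0)
  let tl := tl + 2
  let tl := if PySem.Int.mod tl 32 == 0 then tl + 96 else tl
  (bl, tl)

def brailleToBinary (braille : List (List (List Int))) : List Int :=
  (braille.foldl pvStepA (List.replicate 256 (0 : Int), (0 : Int))).1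

-- ===== PORT B =====
-- literal transliteration of B's per-output-cell lookup 'cell(k)'; pyGetD is exact on Pre_
-- (all three indices in range there whenever the guard i < n holds)
def pvCell (braille : List (List (List Int))) (n : Int) (k : Int) : Int :=
  let i := PySem.Int.floordiv k 128 * 16 + PySem.Int.floordiv (PySem.Int.mod k 32) 2
  if i < n then
    PySem.List.pyGetD
      (PySem.List.pyGetD (PySem.List.pyGetD braille i [])
        (PySem.Int.floordiv (PySem.Int.mod k 128) 32) [])
      (PySem.Int.mod k 2) 0
  else 0

def brailleToBinary_alt (braille : List (List (List Int))) : List Int :=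
  let n := (braille.length : Int)
  (PySem.List.pyRange 0 256 1).map (fun k => pvCell braille n k)

-- ===== PRECONDITION & SPEC =====
-- Pre_ = exactly the inputs on which Python A returns (no IndexError): at most 32 blocks
-- (the 33rd block's write hits index 256), and each block has ≥ 4 rows whose first four rows have ≥ 2 entries.
def Pre_brailleToBinary (braille : List (List (List Int))) : Prop :=
  braille.length ≤ 32 ∧
  ∀ b42 ∈ braille, 4 ≤ b42.length ∧ ∀ r ∈ b42.take 4, 2 ≤ r.length
instance (braille : List (List (List Int))) : Decidable (Pre_brailleToBinary braille) := by
  unfold Pre_brailleToBinary; infer_instance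
def pvWitness_brailleToBinary : List (List (List Int)) :=
  [[[1,0],[0,1],[1,1],[0,0]]]

def Spec_brailleToBinary (braille : List (List (List Int))) (out : List Int) : Prop := out = brailleToBinary_alt braille
instance (braille : List (List (List Int))) (out : List Int) : Decidable (Spec_brailleToBinary braille out) := by unfold Spec_brailleToBinary; infer_instance

-- ===== CLAIM (what is proved, stated in full; the proofs are below) =====
def Claim_equal_brailleToBinary : Prop := ∀ (braille : List (List (List Int))), Dom_brailleToBinary braille → Pre_brailleToBinary braille → Spec_brailleToBinary braille (brailleToBinary braille)

-- ===== LEMMAS AND PROOFS =====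

-- A's topLeft after i blocks, in closed form
def pvTl (i : Nat) : Nat := i / 16 * 128 + i % 16 * 2
-- the block index B's cell(k) reads from
def pvIOf (k : Nat) : Nat := k / 128 * 16 + k % 32 / 2
-- B's cell value in Nat-indexed form
def pvG (braille : List (List (List Int))) (k : Nat) : Int :=
  ((braille.getD (pvIOf k) []).getD (k % 128 / 32) []).getD (k % 2) 0

theorem pvTl_step (i : Nat) :
    (if (PySem.Int.mod ((pvTl i : Int) + 2) 32 == 0) = true then (pvTl i : Int) + 2 + 96 else (pvTl i : Int) + 2)
      = (pvTl (i+1) : Int) := by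
  rw [show PySem.Int.mod ((pvTl i : Int) + 2) 32 = (((pvTl i + 2) % 32 : Nat) : Int) from by
        rw [show ((pvTl i : Int) + 2) = ((pvTl i + 2 : Nat) : Int) from by push_cast; ring]
        exact_mod_cast PySem.Int.mod_natCast (pvTl i + 2) 32]
  split_ifs with h
  · simp only [beq_iff_eq] at h
    have h' : (pvTl i + 2) % 32 = 0 := by exact_mod_cast h
    unfold pvTl at h' ⊢; push_cast; omega
  · simp only [beq_iff_eq] at h
    have h' : ¬ (pvTl i + 2) % 32 = 0 := fun hc => h (by exact_mod_cast hc)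
    unfold pvTl at h' ⊢; push_cast; omega

theorem pv_getD_set (xs : List Int) (i k : Nat) (v : Int) (hi : i < xs.length) :
    (xs.set i v).getD k 0 = if k = i then v else xs.getD k 0 := by
  by_cases hk : k = i
  · subst hk; simp [List.getD_eq_getElem?_getD, hi]
  · rw [if_neg hk, List.getD_eq_getElem?_getD, List.getD_eq_getElem?_getD,
        List.getElem?_set_ne (fun h => hk h.symm)]

-- one block's eight writes, elementwise
theorem pvStepA_getD (bl : List Int) (hbl : bl.length = 256) (m : Nat) (hm : m < 32)
    (b42 : List (List Int)) :
    (pvStepA (bl, (pvTl m : Int)) b42).1.length = 256 ∧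
    ∀ k, k < 256 →
      (pvStepA (bl, (pvTl m : Int)) b42).1.getD k 0 =
        if pvIOf k = m then (b42.getD (k % 128 / 32) []).getD (k % 2) 0 else bl.getD k 0 := by
  have htl : pvTl m ≤ 158 := by unfold pvTl; omega
  simp only [pvStepA,
    show ((pvTl m : Int) + 1) = ((pvTl m + 1 : Nat) : Int) from by push_cast; ring,
    show ((pvTl m : Int) + 32) = ((pvTl m + 32 : Nat) : Int) from by push_cast; ring,
    show ((pvTl m : Int) + 33) = ((pvTl m + 33 : Nat) : Int) from by push_cast; ring,
    show ((pvTl m : Int) + 64) = ((pvTl m + 64 : Nat) : Int) from by push_cast; ring,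
    show ((pvTl m : Int) + 65) = ((pvTl m + 65 : Nat) : Int) from by push_cast; ring,
    show ((pvTl m : Int) + 96) = ((pvTl m + 96 : Nat) : Int) from by push_cast; ring,
    show ((pvTl m : Int) + 97) = ((pvTl m + 97 : Nat) : Int) from by push_cast; ring,
    PySem.List.pySetD_natCast]
  refine ⟨by simp [hbl], ?_⟩
  intro k hk
  rw [pv_getD_set _ _ _ _ (by simp [hbl]; omega),
      pv_getD_set _ _ _ _ (by simp [hbl]; omega),
      pv_getD_set _ _ _ _ (by simp [hbl]; omega),
      pv_getD_set _ _ _ _ (by simp [hbl]; omega),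
      pv_getD_set _ _ _ _ (by simp [hbl]; omega),
      pv_getD_set _ _ _ _ (by simp [hbl]; omega),
      pv_getD_set _ _ _ _ (by simp [hbl]; omega),
      pv_getD_set _ _ _ _ (by simp [hbl]; omega)]
  simp only [PySem.List.pyGetD_ofNat']
  by_cases hio : pvIOf k = m
  · have hk' : k = pvTl m + 32 * (k % 128 / 32) + k % 2 := by
      unfold pvIOf at hio; unfold pvTl; omega
    have hr : k % 128 / 32 = 0 ∨ k % 128 / 32 = 1 ∨ k % 128 / 32 = 2 ∨ k % 128 / 32 = 3 := by
      omega
    have hc : k % 2 = 0 ∨ k % 2 = 1 := by omega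
    rcases hr with hr | hr | hr | hr <;> rcases hc with hc | hc <;>
      rw [hr, hc] at hk' ⊢ <;> split_ifs <;> first | rfl | omega
  · rw [if_neg hio,
        if_neg (fun h : k = pvTl m + 97 => hio (by rw [h]; unfold pvIOf pvTl; omega)),
        if_neg (fun h : k = pvTl m + 96 => hio (by rw [h]; unfold pvIOf pvTl; omega)),
        if_neg (fun h : k = pvTl m + 65 => hio (by rw [h]; unfold pvIOf pvTl; omega)),
        if_neg (fun h : k = pvTl m + 64 => hio (by rw [h]; unfold pvIOf pvTl; omega)),
        if_neg (fun h : k = pvTl m + 33 => hio (by rw [h]; unfold pvIOf pvTl; omega)),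
        if_neg (fun h : k = pvTl m + 32 => hio (by rw [h]; unfold pvIOf pvTl; omega)),
        if_neg (fun h : k = pvTl m + 1 => hio (by rw [h]; unfold pvIOf pvTl; omega)),
        if_neg (fun h : k = pvTl m => hio (by rw [h]; unfold pvIOf pvTl; omega))]

-- folding A over the suffix of blocks starting at index m keeps the elementwise invariant
theorem pv_foldA (orig : List (List (List Int))) (hlen : orig.length ≤ 32) :
    ∀ (rest : List (List (List Int))) (m : Nat) (bl : List Int),
    rest = orig.drop m → bl.length = 256 →
    (∀ k, k < 256 → bl.getD k 0 = if pvIOf k < m then pvG orig k else 0) →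
    (rest.foldl pvStepA (bl, (pvTl m : Int))).1.length = 256 ∧
    ∀ k, k < 256 → (rest.foldl pvStepA (bl, (pvTl m : Int))).1.getD k 0 =
      if pvIOf k < m + rest.length then pvG orig k else 0 := by
  intro rest
  induction rest with
  | nil => intro m bl _ hbl hinv; exact ⟨hbl, by simpa using hinv⟩
  | cons b42 rest' ih =>
    intro m bl hrest hbl hinv
    have hm : m < orig.length := by
      by_contra h
      rw [List.drop_eq_nil_of_le (by omega)] at hrest
      simp at hrest
    have hb42 : b42 = orig.getD m [] := by
      have h1 : (orig.drop m).getD 0 [] = b42 := by rw [← hrest]; rfl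
      rw [← h1, List.getD_eq_getElem _ _ (by simp [List.length_drop]; omega),
          List.getD_eq_getElem _ _ hm, List.getElem_drop]
      simp
    have hrest' : rest' = orig.drop (m + 1) := by
      have h1 : (orig.drop m).drop 1 = rest' := by rw [← hrest]; rfl
      rw [← h1, List.drop_drop]
    have hstep := pvStepA_getD bl hbl m (by omega) b42
    have hsnd : (pvStepA (bl, (pvTl m : Int)) b42).2 = (pvTl (m+1) : Int) := by
      simpa only [pvStepA] using pvTl_step m
    have hpair : pvStepA (bl, (pvTl m : Int)) b42
        = ((pvStepA (bl, (pvTl m : Int)) b42).1, (pvTl (m+1) : Int)) := by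
      rw [← hsnd]
    rw [List.foldl_cons, hpair]
    have hinv' : ∀ k, k < 256 →
        (pvStepA (bl, (pvTl m : Int)) b42).1.getD k 0 =
          if pvIOf k < m + 1 then pvG orig k else 0 := by
      intro k hk
      rw [hstep.2 k hk]
      by_cases hio : pvIOf k = m
      · rw [if_pos hio, if_pos (by omega)]
        unfold pvG
        rw [hb42, hio]
      · rw [if_neg hio, hinv k hk]
        by_cases hlt : pvIOf k < m
        · rw [if_pos hlt, if_pos (by omega)]
        · rw [if_neg hlt, if_neg (by omega)]
    have := ih (m + 1) (pvStepA (bl, (pvTl m : Int)) b42).1 hrest' hstep.1 hinv'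
    refine ⟨this.1, fun k hk => ?_⟩
    rw [this.2 k hk]
    simp only [List.length_cons]
    by_cases h : pvIOf k < m + 1 + rest'.length
    · rw [if_pos h, if_pos (by omega)]
    · rw [if_neg h, if_neg (by omega)]

-- B's comprehension, in Nat-indexed form
theorem pv_altB (braille : List (List (List Int))) :
    brailleToBinary_alt braille
      = (List.range 256).map (fun k => if pvIOf k < braille.length then pvG braille k else 0) := by
  unfold brailleToBinary_alt
  rw [PySem.List.pyRange_one]
  rw [show ((256:Int) - 0).toNat = 256 from by omega, List.map_map]
  apply List.map_congr_left
  intro k hk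
  have hk' : k < 256 := List.mem_range.mp hk
  simp only [Function.comp, zero_add]
  unfold pvCell
  have e1 : PySem.Int.floordiv (k : Int) 128 = ((k / 128 : Nat) : Int) := by
    exact_mod_cast PySem.Int.floordiv_natCast k 128
  have e2 : PySem.Int.mod (k : Int) 32 = ((k % 32 : Nat) : Int) := by
    exact_mod_cast PySem.Int.mod_natCast k 32
  have e3 : PySem.Int.floordiv ((k % 32 : Nat) : Int) 2 = ((k % 32 / 2 : Nat) : Int) := by
    exact_mod_cast PySem.Int.floordiv_natCast (k % 32) 2
  have e4 : PySem.Int.mod (k : Int) 128 = ((k % 128 : Nat) : Int) := by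
    exact_mod_cast PySem.Int.mod_natCast k 128
  have e5 : PySem.Int.floordiv ((k % 128 : Nat) : Int) 32 = ((k % 128 / 32 : Nat) : Int) := by
    exact_mod_cast PySem.Int.floordiv_natCast (k % 128) 32
  have e6 : PySem.Int.mod (k : Int) 2 = ((k % 2 : Nat) : Int) := by
    exact_mod_cast PySem.Int.mod_natCast k 2
  rw [e1, e2, e3, e4, e5, e6,
      show ((k / 128 : Nat) : Int) * 16 + ((k % 32 / 2 : Nat) : Int) = ((pvIOf k : Nat) : Int)
        from by unfold pvIOf; push_cast; ring]
  unfold pvG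
  by_cases h : pvIOf k < braille.length
  · rw [if_pos (by exact_mod_cast h), if_pos h]
    simp only [PySem.List.pyGetD_natCast]
  · rw [if_neg (by exact_mod_cast h), if_neg h]

-- ===== VERDICT (by name: the statement is the Claim_ definition above) =====
theorem brailleToBinary_spec : Claim_equal_brailleToBinary := by
  intro braille _ hpre
  unfold Spec_brailleToBinary brailleToBinary
  have h := pv_foldA braille hpre.1 braille 0 (List.replicate 256 (0 : Int))
    (by rw [List.drop_zero]) (by rw [List.length_replicate])
    (by intro k hk
        rw [List.getD_eq_getElem?_getD, List.getElem?_replicate, if_pos hk,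
            if_neg (Nat.not_lt_zero _)]
        rfl)
  rw [show ((pvTl 0 : Nat) : Int) = (0 : Int) from by norm_num [pvTl]] at h
  rw [pv_altB]
  apply List.ext_getElem
  · rw [h.1, List.length_map, List.length_range]
  · intro k h1 h2
    have hk : k < 256 := by rw [h.1] at h1; exact h1
    have hgd := h.2 k hk
    rw [List.getD_eq_getElem _ _ h1, Nat.zero_add] at hgd
    rw [hgd, List.getElem_map, List.getElem_range]
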